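-- pv_equiv track=rewrite | github.com/Fondamenti18/fondamenti-di-programmazione | students/1802989/homework01/program02.py | final_check
-- ===== SOURCE A (Python) =====
-- check = {'unocento': 'cento', 'unomille': 'mille', 'unomilione': 'unmilione', 'unomiliardo': 'unmiliardo',
--          'unobilione': 'unbilione'}
--
-- def final_check(numero):
--     'Funzione di chiusura, usata per lanciare in risultato finale'
--     for k,v in check.items():
--         index = numero.find(k)
--         if index != -1:
--             n = numero[index:index+len(k)]
--             numero = numero.replace(n, v)
--   #Caso noto, in corrispondenza di questo caso conviene sostituire direttamente il valore
--     if 'oottant'in numero: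
--         numero = numero.replace('oottant', 'ottant')
--     return numero
-- ===== SOURCE B (Python) =====
-- _MAPPING = [('unocento', 'cento'), ('unomille', 'mille'), ('unomilione', 'unmilione'),
--             ('unomiliardo', 'unmiliardo'), ('unobilione', 'unbilione')]
--
-- def final_check(numero):
--     'Funzione di chiusura, usata per lanciare in risultato finale'
--     out = []
--     i = 0
--     n = len(numero)
--     while i < n:
--         for k, v in _MAPPING:
--             if numero.startswith(k, i):
--                 out.append(v)
--                 i += len(k)
--                 break
--         else:
--             out.append(numero[i])
--             i += 1
--     return ''.join(out).replace('oottant', 'ottant')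
-- ===== Notes on version B (the rewrite author's own statement) =====
-- stated objective: alternative
-- what changed: Replaces the five independent find+replace scans over the whole string by one single left-to-right scan that substitutes whichever key starts at the current position (the keys are mutually non-overlapping and the substitutions cannot create new matches), followed by the same final cleanup replace.
import Mathlib
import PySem

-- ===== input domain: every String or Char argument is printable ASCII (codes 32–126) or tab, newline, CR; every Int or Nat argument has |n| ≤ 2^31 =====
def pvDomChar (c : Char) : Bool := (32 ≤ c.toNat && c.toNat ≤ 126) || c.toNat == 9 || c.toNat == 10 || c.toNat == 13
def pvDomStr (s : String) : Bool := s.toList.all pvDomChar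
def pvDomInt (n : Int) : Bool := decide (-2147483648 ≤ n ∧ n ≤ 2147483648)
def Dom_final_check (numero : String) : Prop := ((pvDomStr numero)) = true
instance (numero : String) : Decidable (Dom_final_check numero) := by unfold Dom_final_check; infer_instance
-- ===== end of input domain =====

-- B replaces A's five independent whole-string find+replace scans by one left-to-right scan
-- substituting whichever key starts at the current position, then the single 'oottant' cleanup
-- replace (objective: alternative single-pass structure; same observable results).

-- ===== PORT A =====
def fcCheck : List (String × String) :=
  [("unocento", "cento"), ("unomille", "mille"), ("unomilione", "unmilione"),
   ("unomiliardo", "unmiliardo"), ("unobilione", "unbilione")]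

def fcStep (numero : String) (kv : String × String) : String :=
  let index := PySem.Str.find numero kv.1
  if index ≠ -1 then
    let n := PySem.Str.slice numero (some index) (some (index + PySem.Str.len kv.1))
    PySem.Str.replace numero n kv.2
  else numero

def final_check (numero : String) : String :=
  let numero := fcCheck.foldl fcStep numero
  if PySem.Str.isIn "oottant" numero = true then PySem.Str.replace numero "oottant" "ottant"
  else numero

-- ===== PORT B =====
-- Source B's while-loop over positions, as structural recursion on the remaining characters;
-- the inner for-loop over the five constant pairs of _MAPPING is unrolled into the if-chain.
def fcScan : List Char → List Char
  | [] => []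
  | c :: t =>
    if ("unocento".toList).isPrefixOf (c :: t) then "cento".toList ++ fcScan (t.drop 7)
    else if ("unomille".toList).isPrefixOf (c :: t) then "mille".toList ++ fcScan (t.drop 7)
    else if ("unomilione".toList).isPrefixOf (c :: t) then "unmilione".toList ++ fcScan (t.drop 9)
    else if ("unomiliardo".toList).isPrefixOf (c :: t) then "unmiliardo".toList ++ fcScan (t.drop 10)
    else if ("unobilione".toList).isPrefixOf (c :: t) then "unbilione".toList ++ fcScan (t.drop 9)
    else c :: fcScan t
  termination_by s => s.length
  decreasing_by all_goals (simp; try omega)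

def final_check_alt (numero : String) : String :=
  PySem.Str.replace (String.ofList (fcScan numero.toList)) "oottant" "ottant"

-- ===== PRECONDITION & SPEC =====
def Spec_final_check (numero : String) (out : String) : Prop := out = final_check_alt numero
instance (numero : String) (out : String) : Decidable (Spec_final_check numero out) := by unfold Spec_final_check; infer_instance

-- ===== CLAIM (what is proved, stated in full; the proofs are below) =====
def Claim_equal_final_check : Prop := ∀ (numero : String), Dom_final_check numero → Spec_final_check numero (final_check numero)

-- ===== LEMMAS AND PROOFS =====

-- Python str.replace(old, new) for old ≠ '', as a clean recursion on the string.
def replC (k v : List Char) : List Char → List Char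
  | [] => []
  | c :: t =>
    if k ≠ [] ∧ k.isPrefixOf (c :: t) = true then v ++ replC k v (t.drop (k.length - 1))
    else c :: replC k v t
  termination_by s => s.length
  decreasing_by all_goals (simp; try omega)

theorem replC_nil (k v : List Char) : replC k v [] = [] := by
  rw [replC]

theorem replC_cons (k v : List Char) (c : Char) (t : List Char) :
    replC k v (c :: t) =
      if k ≠ [] ∧ k.isPrefixOf (c :: t) = true then v ++ replC k v (t.drop (k.length - 1))
      else c :: replC k v t := by
  rw [replC]

theorem replC_cons_pos (k v : List Char) (c : Char) (t : List Char)
    (hk : k ≠ []) (h : k <+: (c :: t)) :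
    replC k v (c :: t) = v ++ replC k v (t.drop (k.length - 1)) := by
  rw [replC_cons, if_pos ⟨hk, List.isPrefixOf_iff_prefix.mpr h⟩]

theorem replC_cons_neg (k v : List Char) (c : Char) (t : List Char)
    (h : ¬ k <+: (c :: t)) :
    replC k v (c :: t) = c :: replC k v t := by
  rw [replC_cons, if_neg]
  rintro ⟨-, hp⟩
  exact h (List.isPrefixOf_iff_prefix.mp hp)

theorem replC_append_match (k v b : List Char) (hk : k ≠ []) :
    replC k v (k ++ b) = v ++ replC k v b := by
  obtain ⟨c, k', rfl⟩ : ∃ c k', k = c :: k' := by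
    cases k with
    | nil => exact absurd rfl hk
    | cons c k' => exact ⟨c, k', rfl⟩
  rw [List.cons_append, replC_cons_pos _ _ _ _ hk (by rw [← List.cons_append]; exact List.prefix_append _ _)]
  congr 2
  simp

theorem not_prefix_of_head_ne (k : List Char) (u c : Char) (t : List Char)
    (hk : k.head? = some u) (hne : u ≠ c) : ¬ k <+: (c :: t) := by
  intro hp
  cases k with
  | nil => simp at hk
  | cons a k' =>
    obtain ⟨ha, -⟩ := List.cons_prefix_cons.mp hp
    simp only [List.head?_cons, Option.some.injEq] at hk
    exact hne (hk.symm ▸ ha)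

theorem replC_cons_ne (k v : List Char) (u c : Char) (t : List Char)
    (hk : k.head? = some u) (hne : u ≠ c) :
    replC k v (c :: t) = c :: replC k v t :=
  replC_cons_neg _ _ _ _ (not_prefix_of_head_ne k u c t hk hne)

theorem replC_pass_ufree (k v a b : List Char) (hk : k.head? = some 'u') (ha : 'u' ∉ a) :
    replC k v (a ++ b) = a ++ replC k v b := by
  induction a with
  | nil => simp
  | cons c a' ih =>
    have hc : 'u' ≠ c := fun h => ha (h ▸ List.mem_cons_self)
    rw [List.cons_append, replC_cons_ne _ _ _ _ _ hk hc, ih (fun h => ha (List.mem_cons_of_mem _ h))]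
    simp

theorem not_prefix_append_of_mismatch (k a : List Char) (m : Nat)
    (hmk : m < k.length) (hma : m < a.length) (hne : k[m]? ≠ a[m]?) (b : List Char) :
    ¬ k <+: a ++ b := by
  intro h
  obtain ⟨t, ht⟩ := h
  apply hne
  have h1 : (k ++ t)[m]? = k[m]? := List.getElem?_append_left hmk
  have h2 : (a ++ b)[m]? = a[m]? := List.getElem?_append_left hma
  rw [ht] at h1
  rw [h1] at h2
  exact h2

theorem replC_pass_u (k v a b : List Char) (hk : k.head? = some 'u')
    (ha : a.head? = some 'u') (ha' : 'u' ∉ a.tail) (hnp : ¬ k <+: a ++ b) :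
    replC k v (a ++ b) = a ++ replC k v b := by
  cases a with
  | nil => simp at ha
  | cons c a' =>
    simp only [List.head?_cons, Option.some.injEq] at ha
    subst ha
    simp only [List.tail_cons] at ha'
    rw [List.cons_append, replC_cons_neg _ _ _ _ (by rwa [← List.cons_append]),
        replC_pass_ufree _ _ _ _ hk ha']
    simp

theorem replC_of_not_infix (k v s : List Char) (h : ¬ k <:+: s) : replC k v s = s := by
  induction s with
  | nil => exact replC_nil _ _
  | cons c t ih =>
    rw [replC_cons, if_neg, ih (fun hi => h (List.infix_cons hi))]
    rintro ⟨-, hp⟩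
    exact h (List.isPrefixOf_iff_prefix.mp hp).isInfix

-- bridge: PySem.Chars.replace = replC for a nonempty pattern
theorem go_eq_replC (k v : List Char) (hk : k ≠ []) :
    ∀ (fuel : Nat) (l acc : List Char), l.length ≤ fuel →
      PySem.Chars.replace.go k v fuel l acc = acc.reverse ++ replC k v l := by
  intro fuel
  induction fuel with
  | zero =>
    intro l acc h
    have hl : l = [] := by cases l <;> simp_all
    subst hl
    rw [PySem.Chars.replace.go.eq_def]
    simp [replC_nil]
  | succ n ih =>
    intro l acc h
    cases l with
    | nil =>
      rw [PySem.Chars.replace.go.eq_def]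
      simp [replC_nil]
    | cons c t =>
      have ht : t.length ≤ n := by simp at h; omega
      rw [PySem.Chars.replace.go.eq_def]
      by_cases hp : k.isPrefixOf (c :: t) = true
      · simp only [hp, if_true]
        obtain ⟨d, hd⟩ : ∃ d, k.length = d + 1 := by
          cases k with
          | nil => exact absurd rfl hk
          | cons a k' => exact ⟨k'.length, rfl⟩
        have hdrop : (c :: t).drop k.length = t.drop (k.length - 1) := by
          rw [hd]; simp
        rw [hdrop, ih _ _ (by simp; omega)]
        rw [replC_cons_pos _ _ _ _ hk (List.isPrefixOf_iff_prefix.mp hp)]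
        simp
      · simp only [hp]
        rw [ih _ _ ht]
        rw [replC_cons_neg _ _ _ _ (fun hpre => hp (List.isPrefixOf_iff_prefix.mpr hpre))]
        simp

theorem replace_eq_replC (s k v : List Char) (hk : k ≠ []) :
    PySem.Chars.replace s k v = replC k v s := by
  unfold PySem.Chars.replace
  rw [if_neg (by simp [hk]), go_eq_replC k v hk s.length s [] le_rfl]
  simp

-- no-creation lemma 1: a replacement whose value starts with 'u' cannot create a 'u'-free prefix
theorem nc1 (k v : List Char) (hk : k.head? = some 'u') (hv : v.head? = some 'u') :
    ∀ (n : Nat) (t : List Char), t.length ≤ n → ∀ q, 'u' ∉ q →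
      q <+: replC k v t → q <+: t := by
  intro n
  induction n with
  | zero =>
    intro t ht q hq hpre
    have hl : t = [] := by cases t <;> simp_all
    subst hl
    rwa [replC_nil] at hpre
  | succ n ih =>
    intro t ht q hq hpre
    cases t with
    | nil => rwa [replC_nil] at hpre
    | cons c t' =>
      by_cases hp : k ≠ [] ∧ k <+: (c :: t')
      · rw [replC_cons_pos _ _ _ _ hp.1 hp.2] at hpre
        cases q with
        | nil => exact List.nil_prefix
        | cons q0 q' =>
          exfalso
          obtain ⟨u', v', rfl⟩ : ∃ u' v', v = u' :: v' := by
            cases v with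
            | nil => simp at hv
            | cons a b => exact ⟨a, b, rfl⟩
          simp only [List.head?_cons, Option.some.injEq] at hv
          rw [List.cons_append] at hpre
          obtain ⟨he, -⟩ := List.cons_prefix_cons.mp hpre
          exact hq (by rw [he, ← hv]; exact List.mem_cons_self)
      · have hnp : ¬ k <+: (c :: t') := by
          intro hpre'
          apply hp
          refine ⟨?_, hpre'⟩
          intro hknil
          subst hknil
          simp at hk
        rw [replC_cons_neg _ _ _ _ hnp] at hpre
        cases q with
        | nil => exact List.nil_prefix
        | cons q0 q' =>
          obtain ⟨he, hq'⟩ := List.cons_prefix_cons.mp hpre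
          subst he
          exact List.cons_prefix_cons.mpr ⟨rfl,
            ih t' (by simp at ht; omega) q' (fun h => hq (List.mem_cons_of_mem _ h)) hq'⟩

-- no-creation lemma 2: a u-free value v that never aligns with any suffix of q cannot create q
theorem nc2 (k v : List Char) (hk : k.head? = some 'u') :
    ∀ (n : Nat) (t : List Char), t.length ≤ n → ∀ q, 'u' ∉ q →
      (∀ p, p < q.length → ¬ v <+: q.drop p ∧ ¬ q.drop p <+: v) →
      q <+: replC k v t → q <+: t := by
  intro n
  induction n with
  | zero =>
    intro t ht q hq hcond hpre
    have hl : t = [] := by cases t <;> simp_all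
    subst hl
    rwa [replC_nil] at hpre
  | succ n ih =>
    intro t ht q hq hcond hpre
    cases t with
    | nil => rwa [replC_nil] at hpre
    | cons c t' =>
      by_cases hp : k ≠ [] ∧ k <+: (c :: t')
      · rw [replC_cons_pos _ _ _ _ hp.1 hp.2] at hpre
        cases q with
        | nil => exact List.nil_prefix
        | cons q0 q' =>
          exfalso
          have h0 := hcond 0 (by simp)
          simp only [List.drop_zero] at h0
          have hqv : (q0 :: q') <+: v ++ replC k v (t'.drop (k.length - 1)) := hpre
          rcases List.prefix_or_prefix_of_prefix hqv (List.prefix_append v _) with h | h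
          · exact h0.2 h
          · exact h0.1 h
      · have hnp : ¬ k <+: (c :: t') := by
          intro hpre'
          apply hp
          refine ⟨?_, hpre'⟩
          intro hknil
          subst hknil
          simp at hk
        rw [replC_cons_neg _ _ _ _ hnp] at hpre
        cases q with
        | nil => exact List.nil_prefix
        | cons q0 q' =>
          obtain ⟨he, hq'⟩ := List.cons_prefix_cons.mp hpre
          subst he
          refine List.cons_prefix_cons.mpr ⟨rfl, ih t' (by simp at ht; omega) q'
            (fun h => hq (List.mem_cons_of_mem _ h)) ?_ hq'⟩
          intro p hp'
          have := hcond (p + 1) (by simp; omega)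
          simpa using this

-- fcScan unfolding lemmas
theorem fcScan_nil : fcScan [] = [] := by rw [fcScan]

theorem fcScan_cons (c : Char) (t : List Char) :
    fcScan (c :: t) =
      if ("unocento".toList).isPrefixOf (c :: t) then "cento".toList ++ fcScan (t.drop 7)
      else if ("unomille".toList).isPrefixOf (c :: t) then "mille".toList ++ fcScan (t.drop 7)
      else if ("unomilione".toList).isPrefixOf (c :: t) then "unmilione".toList ++ fcScan (t.drop 9)
      else if ("unomiliardo".toList).isPrefixOf (c :: t) then "unmiliardo".toList ++ fcScan (t.drop 10)
      else if ("unobilione".toList).isPrefixOf (c :: t) then "unbilione".toList ++ fcScan (t.drop 9)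
      else c :: fcScan t := by
  rw [fcScan]

theorem fcScan_k1 (b : List Char) :
    fcScan ("unocento".toList ++ b) = "cento".toList ++ fcScan b := by
  have h : "unocento".toList ++ b = 'u' :: ("nocento".toList ++ b) := rfl
  rw [h, fcScan_cons]
  simp only [List.isPrefixOf_iff_prefix]
  rw [if_pos (h ▸ List.prefix_append "unocento".toList b)]
  rw [List.drop_left' (show ("nocento".toList).length = 7 by decide)]

theorem fcScan_k2 (b : List Char) (h1 : ¬ "unocento".toList <+: "unomille".toList ++ b) :
    fcScan ("unomille".toList ++ b) = "mille".toList ++ fcScan b := by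
  have h : "unomille".toList ++ b = 'u' :: ("nomille".toList ++ b) := rfl
  rw [h, fcScan_cons]
  simp only [List.isPrefixOf_iff_prefix]
  rw [if_neg (h ▸ h1)]
  rw [if_pos (h ▸ List.prefix_append "unomille".toList b)]
  rw [List.drop_left' (show ("nomille".toList).length = 7 by decide)]

theorem fcScan_k3 (b : List Char) (h1 : ¬ "unocento".toList <+: "unomilione".toList ++ b) (h2 : ¬ "unomille".toList <+: "unomilione".toList ++ b) :
    fcScan ("unomilione".toList ++ b) = "unmilione".toList ++ fcScan b := by
  have h : "unomilione".toList ++ b = 'u' :: ("nomilione".toList ++ b) := rfl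
  rw [h, fcScan_cons]
  simp only [List.isPrefixOf_iff_prefix]
  rw [if_neg (h ▸ h1)]
  rw [if_neg (h ▸ h2)]
  rw [if_pos (h ▸ List.prefix_append "unomilione".toList b)]
  rw [List.drop_left' (show ("nomilione".toList).length = 9 by decide)]

theorem fcScan_k4 (b : List Char) (h1 : ¬ "unocento".toList <+: "unomiliardo".toList ++ b) (h2 : ¬ "unomille".toList <+: "unomiliardo".toList ++ b) (h3 : ¬ "unomilione".toList <+: "unomiliardo".toList ++ b) :
    fcScan ("unomiliardo".toList ++ b) = "unmiliardo".toList ++ fcScan b := by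
  have h : "unomiliardo".toList ++ b = 'u' :: ("nomiliardo".toList ++ b) := rfl
  rw [h, fcScan_cons]
  simp only [List.isPrefixOf_iff_prefix]
  rw [if_neg (h ▸ h1)]
  rw [if_neg (h ▸ h2)]
  rw [if_neg (h ▸ h3)]
  rw [if_pos (h ▸ List.prefix_append "unomiliardo".toList b)]
  rw [List.drop_left' (show ("nomiliardo".toList).length = 10 by decide)]

theorem fcScan_k5 (b : List Char) (h1 : ¬ "unocento".toList <+: "unobilione".toList ++ b) (h2 : ¬ "unomille".toList <+: "unobilione".toList ++ b) (h3 : ¬ "unomilione".toList <+: "unobilione".toList ++ b) (h4 : ¬ "unomiliardo".toList <+: "unobilione".toList ++ b) :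
    fcScan ("unobilione".toList ++ b) = "unbilione".toList ++ fcScan b := by
  have h : "unobilione".toList ++ b = 'u' :: ("nobilione".toList ++ b) := rfl
  rw [h, fcScan_cons]
  simp only [List.isPrefixOf_iff_prefix]
  rw [if_neg (h ▸ h1)]
  rw [if_neg (h ▸ h2)]
  rw [if_neg (h ▸ h3)]
  rw [if_neg (h ▸ h4)]
  rw [if_pos (h ▸ List.prefix_append "unobilione".toList b)]
  rw [List.drop_left' (show ("nobilione".toList).length = 9 by decide)]

theorem fcScan_cons_nomatch (c : Char) (t : List Char)
    (h1 : ¬ "unocento".toList <+: (c :: t)) (h2 : ¬ "unomille".toList <+: (c :: t))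
    (h3 : ¬ "unomilione".toList <+: (c :: t)) (h4 : ¬ "unomiliardo".toList <+: (c :: t))
    (h5 : ¬ "unobilione".toList <+: (c :: t)) :
    fcScan (c :: t) = c :: fcScan t := by
  rw [fcScan_cons]
  simp only [List.isPrefixOf_iff_prefix]
  rw [if_neg h1, if_neg h2, if_neg h3, if_neg h4, if_neg h5]

-- the main equivalence on character lists
theorem mainAux : ∀ (n : Nat) (s : List Char), s.length ≤ n →
    replC "unobilione".toList "unbilione".toList
      (replC "unomiliardo".toList "unmiliardo".toList
        (replC "unomilione".toList "unmilione".toList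
          (replC "unomille".toList "mille".toList
            (replC "unocento".toList "cento".toList s)))) = fcScan s := by
  intro n
  induction n with
  | zero =>
    intro s h
    have hs : s = [] := by cases s <;> simp_all
    subst hs
    simp [replC_nil, fcScan_nil]
  | succ n ih =>
    intro s hs
    by_cases h1 : "unocento".toList <+: s
    · obtain ⟨b, rfl⟩ := h1
      have hb : b.length ≤ n := by
        have h8 : ("unocento".toList).length = 8 := by decide
        rw [List.length_append, h8] at hs; omega
      rw [replC_append_match _ _ _ (by decide),
          replC_pass_ufree "unomille".toList "mille".toList "cento".toList _ (by decide) (by decide),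
          replC_pass_ufree "unomilione".toList "unmilione".toList "cento".toList _ (by decide) (by decide),
          replC_pass_ufree "unomiliardo".toList "unmiliardo".toList "cento".toList _ (by decide) (by decide),
          replC_pass_ufree "unobilione".toList "unbilione".toList "cento".toList _ (by decide) (by decide),
          fcScan_k1, ih b hb]
    · by_cases h2 : "unomille".toList <+: s
      · obtain ⟨b, rfl⟩ := h2
        have hb : b.length ≤ n := by
          have h8 : ("unomille".toList).length = 8 := by decide
          rw [List.length_append, h8] at hs; omega
        rw [replC_pass_u "unocento".toList "cento".toList "unomille".toList _ (by decide) (by decide)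
              (by decide) (not_prefix_append_of_mismatch _ _ 3 (by decide) (by decide) (by decide) _),
            replC_append_match _ _ _ (by decide),
            replC_pass_ufree "unomilione".toList "unmilione".toList "mille".toList _ (by decide) (by decide),
            replC_pass_ufree "unomiliardo".toList "unmiliardo".toList "mille".toList _ (by decide) (by decide),
            replC_pass_ufree "unobilione".toList "unbilione".toList "mille".toList _ (by decide) (by decide),
            fcScan_k2 b h1, ih b hb]
      · by_cases h3 : "unomilione".toList <+: s
        · obtain ⟨b, rfl⟩ := h3
          have hb : b.length ≤ n := by
            have h8 : ("unomilione".toList).length = 10 := by decide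
            rw [List.length_append, h8] at hs; omega
          rw [replC_pass_u "unocento".toList "cento".toList "unomilione".toList _ (by decide) (by decide)
                (by decide) (not_prefix_append_of_mismatch _ _ 3 (by decide) (by decide) (by decide) _),
              replC_pass_u "unomille".toList "mille".toList "unomilione".toList _ (by decide) (by decide)
                (by decide) (not_prefix_append_of_mismatch _ _ 6 (by decide) (by decide) (by decide) _),
              replC_append_match _ _ _ (by decide),
              replC_pass_u "unomiliardo".toList "unmiliardo".toList "unmilione".toList _ (by decide) (by decide)
                (by decide) (not_prefix_append_of_mismatch _ _ 2 (by decide) (by decide) (by decide) _),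
              replC_pass_u "unobilione".toList "unbilione".toList "unmilione".toList _ (by decide) (by decide)
                (by decide) (not_prefix_append_of_mismatch _ _ 2 (by decide) (by decide) (by decide) _),
              fcScan_k3 b h1 h2, ih b hb]
        · by_cases h4 : "unomiliardo".toList <+: s
          · obtain ⟨b, rfl⟩ := h4
            have hb : b.length ≤ n := by
              have h8 : ("unomiliardo".toList).length = 11 := by decide
              rw [List.length_append, h8] at hs; omega
            rw [replC_pass_u "unocento".toList "cento".toList "unomiliardo".toList _ (by decide) (by decide)
                  (by decide) (not_prefix_append_of_mismatch _ _ 3 (by decide) (by decide) (by decide) _),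
                replC_pass_u "unomille".toList "mille".toList "unomiliardo".toList _ (by decide) (by decide)
                  (by decide) (not_prefix_append_of_mismatch _ _ 6 (by decide) (by decide) (by decide) _),
                replC_pass_u "unomilione".toList "unmilione".toList "unomiliardo".toList _ (by decide) (by decide)
                  (by decide) (not_prefix_append_of_mismatch _ _ 7 (by decide) (by decide) (by decide) _),
                replC_append_match _ _ _ (by decide),
                replC_pass_u "unobilione".toList "unbilione".toList "unmiliardo".toList _ (by decide) (by decide)
                  (by decide) (not_prefix_append_of_mismatch _ _ 2 (by decide) (by decide) (by decide) _),
                fcScan_k4 b h1 h2 h3, ih b hb]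
          · by_cases h5 : "unobilione".toList <+: s
            · obtain ⟨b, rfl⟩ := h5
              have hb : b.length ≤ n := by
                have h8 : ("unobilione".toList).length = 10 := by decide
                rw [List.length_append, h8] at hs; omega
              rw [replC_pass_u "unocento".toList "cento".toList "unobilione".toList _ (by decide) (by decide)
                    (by decide) (not_prefix_append_of_mismatch _ _ 3 (by decide) (by decide) (by decide) _),
                  replC_pass_u "unomille".toList "mille".toList "unobilione".toList _ (by decide) (by decide)
                    (by decide) (not_prefix_append_of_mismatch _ _ 3 (by decide) (by decide) (by decide) _),
                  replC_pass_u "unomilione".toList "unmilione".toList "unobilione".toList _ (by decide) (by decide)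
                    (by decide) (not_prefix_append_of_mismatch _ _ 3 (by decide) (by decide) (by decide) _),
                  replC_pass_u "unomiliardo".toList "unmiliardo".toList "unobilione".toList _ (by decide) (by decide)
                    (by decide) (not_prefix_append_of_mismatch _ _ 3 (by decide) (by decide) (by decide) _),
                  replC_append_match _ _ _ (by decide),
                  fcScan_k5 b h1 h2 h3 h4, ih b hb]
            · cases s with
              | nil => simp [replC_nil, fcScan_nil]
              | cons c t =>
                have ht : t.length ≤ n := by simp at hs; omega
                by_cases hc : c = 'u'
                · subst hc
                  have e1 : replC "unocento".toList "cento".toList ('u' :: t)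
                      = 'u' :: replC "unocento".toList "cento".toList t :=
                    replC_cons_neg _ _ _ _ h1
                  have nK2 : ¬ "unomille".toList <+:
                      'u' :: replC "unocento".toList "cento".toList t := by
                    intro hpre
                    rw [show "unomille".toList = 'u' :: "nomille".toList from rfl] at hpre
                    have hq := (List.cons_prefix_cons.mp hpre).2
                    have hq2 := nc2 "unocento".toList "cento".toList (by decide) _ _ le_rfl
                      "nomille".toList (by decide) (by decide) hq
                    exact h2 (by
                      rw [show "unomille".toList = 'u' :: "nomille".toList from rfl]
                      exact List.cons_prefix_cons.mpr ⟨rfl, hq2⟩)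
                  have e2 : replC "unomille".toList "mille".toList
                        ('u' :: replC "unocento".toList "cento".toList t)
                      = 'u' :: replC "unomille".toList "mille".toList
                          (replC "unocento".toList "cento".toList t) :=
                    replC_cons_neg _ _ _ _ nK2
                  have nK3 : ¬ "unomilione".toList <+:
                      'u' :: replC "unomille".toList "mille".toList
                        (replC "unocento".toList "cento".toList t) := by
                    intro hpre
                    rw [show "unomilione".toList = 'u' :: "nomilione".toList from rfl] at hpre
                    have hq := (List.cons_prefix_cons.mp hpre).2
                    have hq2 := nc2 "unomille".toList "mille".toList (by decide) _ _ le_rfl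
                      "nomilione".toList (by decide) (by decide) hq
                    have hq3 := nc2 "unocento".toList "cento".toList (by decide) _ _ le_rfl
                      "nomilione".toList (by decide) (by decide) hq2
                    exact h3 (by
                      rw [show "unomilione".toList = 'u' :: "nomilione".toList from rfl]
                      exact List.cons_prefix_cons.mpr ⟨rfl, hq3⟩)
                  have e3 := replC_cons_neg "unomilione".toList "unmilione".toList _ _ nK3
                  have nK4 : ¬ "unomiliardo".toList <+:
                      'u' :: replC "unomilione".toList "unmilione".toList
                        (replC "unomille".toList "mille".toList
                          (replC "unocento".toList "cento".toList t)) := by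
                    intro hpre
                    rw [show "unomiliardo".toList = 'u' :: "nomiliardo".toList from rfl] at hpre
                    have hq := (List.cons_prefix_cons.mp hpre).2
                    have hq2 := nc1 "unomilione".toList "unmilione".toList (by decide) (by decide)
                      _ _ le_rfl "nomiliardo".toList (by decide) hq
                    have hq3 := nc2 "unomille".toList "mille".toList (by decide) _ _ le_rfl
                      "nomiliardo".toList (by decide) (by decide) hq2
                    have hq4 := nc2 "unocento".toList "cento".toList (by decide) _ _ le_rfl
                      "nomiliardo".toList (by decide) (by decide) hq3
                    exact h4 (by
                      rw [show "unomiliardo".toList = 'u' :: "nomiliardo".toList from rfl]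
                      exact List.cons_prefix_cons.mpr ⟨rfl, hq4⟩)
                  have e4 := replC_cons_neg "unomiliardo".toList "unmiliardo".toList _ _ nK4
                  have nK5 : ¬ "unobilione".toList <+:
                      'u' :: replC "unomiliardo".toList "unmiliardo".toList
                        (replC "unomilione".toList "unmilione".toList
                          (replC "unomille".toList "mille".toList
                            (replC "unocento".toList "cento".toList t))) := by
                    intro hpre
                    rw [show "unobilione".toList = 'u' :: "nobilione".toList from rfl] at hpre
                    have hq := (List.cons_prefix_cons.mp hpre).2
                    have hq2 := nc1 "unomiliardo".toList "unmiliardo".toList (by decide) (by decide)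
                      _ _ le_rfl "nobilione".toList (by decide) hq
                    have hq3 := nc1 "unomilione".toList "unmilione".toList (by decide) (by decide)
                      _ _ le_rfl "nobilione".toList (by decide) hq2
                    have hq4 := nc2 "unomille".toList "mille".toList (by decide) _ _ le_rfl
                      "nobilione".toList (by decide) (by decide) hq3
                    have hq5 := nc2 "unocento".toList "cento".toList (by decide) _ _ le_rfl
                      "nobilione".toList (by decide) (by decide) hq4
                    exact h5 (by
                      rw [show "unobilione".toList = 'u' :: "nobilione".toList from rfl]
                      exact List.cons_prefix_cons.mpr ⟨rfl, hq5⟩)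
                  have e5 := replC_cons_neg "unobilione".toList "unbilione".toList _ _ nK5
                  rw [e1, e2, e3, e4, e5, ih t ht,
                      fcScan_cons_nomatch _ _ h1 h2 h3 h4 h5]
                · have ne : 'u' ≠ c := fun h => hc h.symm
                  rw [replC_cons_ne "unocento".toList _ 'u' c _ (by decide) ne,
                      replC_cons_ne "unomille".toList _ 'u' c _ (by decide) ne,
                      replC_cons_ne "unomilione".toList _ 'u' c _ (by decide) ne,
                      replC_cons_ne "unomiliardo".toList _ 'u' c _ (by decide) ne,
                      replC_cons_ne "unobilione".toList _ 'u' c _ (by decide) ne,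
                      ih t ht,
                      fcScan_cons_nomatch c t
                        (not_prefix_of_head_ne _ 'u' c _ (by decide) ne)
                        (not_prefix_of_head_ne _ 'u' c _ (by decide) ne)
                        (not_prefix_of_head_ne _ 'u' c _ (by decide) ne)
                        (not_prefix_of_head_ne _ 'u' c _ (by decide) ne)
                        (not_prefix_of_head_ne _ 'u' c _ (by decide) ne)]

-- A's per-key pass computes replC
theorem step_toList (s k v : String) (hk : k.toList ≠ []) :
    (fcStep s (k, v)).toList = replC k.toList v.toList s.toList := by
  rw [show fcStep s (k, v) =
        (if PySem.Str.find s k ≠ -1 then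
          PySem.Str.replace s
            (PySem.Str.slice s (some (PySem.Str.find s k))
              (some (PySem.Str.find s k + PySem.Str.len k))) v
        else s) from rfl]
  rw [PySem.Str.find_eq, PySem.Str.len_eq]
  by_cases h : PySem.Chars.find s.toList k.toList = -1
  · rw [if_neg (by simp [h])]
    exact (replC_of_not_infix _ _ _ ((PySem.Chars.find_eq_neg_one_iff _ _).mp h)).symm
  · rw [if_pos h]
    have h0 : 0 ≤ PySem.Chars.find s.toList k.toList := by
      have := PySem.Chars.neg_one_le_find s.toList k.toList
      omega
    have hspec := PySem.Chars.find_spec (s := s.toList) (sub := k.toList) h0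
    have hslice : (PySem.Str.slice s (some (PySem.Chars.find s.toList k.toList))
        (some (PySem.Chars.find s.toList k.toList + (k.toList.length : Int)))).toList
        = k.toList := by
      rw [PySem.Str.toList_slice]
      show PySem.List.slice s.toList _ _ = _
      rw [PySem.List.slice_toNat _ h0 (by omega)]
      have hlen : (PySem.Chars.find s.toList k.toList + (k.toList.length : Int)).toNat
          - (PySem.Chars.find s.toList k.toList).toNat = k.toList.length := by omega
      rw [hlen]
      exact (List.prefix_iff_eq_take.mp hspec.1).symm
    rw [PySem.Str.toList_replace, hslice, replace_eq_replC _ _ _ hk]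

theorem A_toList (numero : String) :
    (final_check numero).toList =
      replC "oottant".toList "ottant".toList
        (replC "unobilione".toList "unbilione".toList
          (replC "unomiliardo".toList "unmiliardo".toList
            (replC "unomilione".toList "unmilione".toList
              (replC "unomille".toList "mille".toList
                (replC "unocento".toList "cento".toList numero.toList))))) := by
  have hfold : (fcCheck.foldl fcStep numero).toList =
      replC "unobilione".toList "unbilione".toList
        (replC "unomiliardo".toList "unmiliardo".toList
          (replC "unomilione".toList "unmilione".toList
            (replC "unomille".toList "mille".toList
              (replC "unocento".toList "cento".toList numero.toList)))) := by
    unfold fcCheck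
    simp only [List.foldl_cons, List.foldl_nil]
    rw [step_toList _ _ _ (by decide), step_toList _ _ _ (by decide),
        step_toList _ _ _ (by decide), step_toList _ _ _ (by decide),
        step_toList _ _ _ (by decide)]
  unfold final_check
  dsimp only
  by_cases hin : PySem.Str.isIn "oottant" (fcCheck.foldl fcStep numero) = true
  · rw [if_pos hin, PySem.Str.toList_replace, replace_eq_replC _ _ _ (by decide), hfold]
  · rw [if_neg hin, ← hfold]
    refine (replC_of_not_infix _ _ _ ?_).symm
    rw [Bool.not_eq_true, PySem.Str.isIn_eq] at hin
    exact (PySem.Chars.isIn_eq_false_iff _ _).mp hin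

theorem B_toList (numero : String) :
    (final_check_alt numero).toList =
      replC "oottant".toList "ottant".toList (fcScan numero.toList) := by
  unfold final_check_alt
  rw [PySem.Str.toList_replace, String.toList_ofList,
      replace_eq_replC _ _ _ (by decide)]

-- ===== VERDICT (by name: the statement is the Claim_ definition above) =====
theorem final_check_spec : Claim_equal_final_check := by
  intro numero _
  unfold Spec_final_check
  have hA := A_toList numero
  have hB := B_toList numero
  rw [mainAux numero.toList.length numero.toList le_rfl] at hA
  have : (final_check numero).toList = (final_check_alt numero).toList := by rw [hA, hB]
  have := congrArg String.ofList this
  simpa using this
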